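-- pv_equiv track=rewrite | github.com/sympy/sympy | sympy/tensor/array/expressions/array_expressions.py | _get_free_indices_to_position_map
-- ===== SOURCE A (Python) =====
-- def _get_free_indices_to_position_map(free_indices, contraction_indices):
--     free_indices_to_position = {}
--     flattened_contraction_indices = [j for i in contraction_indices for j in i]
--     counter = 0
--     for ind in free_indices:
--         while counter in flattened_contraction_indices:
--             counter += 1
--         free_indices_to_position[ind] = counter
--         counter += 1
--     return free_indices_to_position
-- ===== SOURCE B (Python) =====
-- def _get_free_indices_to_position_map(free_indices, contraction_indices):
--     contracted = {j for i in contraction_indices for j in i}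
--     bound = len(free_indices) + sum(len(i) for i in contraction_indices)
--     positions = [p for p in range(bound) if p not in contracted]
--     return {ind: pos for ind, pos in zip(free_indices, positions)}
-- ===== Notes on version B (the rewrite author's own statement) =====
-- stated objective: faster
-- what changed: Replaced the shared counter with an inner while-scan over the flattened contraction list by building the contracted set once and zipping free_indices with a precomputed filtered range of valid positions.
import Mathlib
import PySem

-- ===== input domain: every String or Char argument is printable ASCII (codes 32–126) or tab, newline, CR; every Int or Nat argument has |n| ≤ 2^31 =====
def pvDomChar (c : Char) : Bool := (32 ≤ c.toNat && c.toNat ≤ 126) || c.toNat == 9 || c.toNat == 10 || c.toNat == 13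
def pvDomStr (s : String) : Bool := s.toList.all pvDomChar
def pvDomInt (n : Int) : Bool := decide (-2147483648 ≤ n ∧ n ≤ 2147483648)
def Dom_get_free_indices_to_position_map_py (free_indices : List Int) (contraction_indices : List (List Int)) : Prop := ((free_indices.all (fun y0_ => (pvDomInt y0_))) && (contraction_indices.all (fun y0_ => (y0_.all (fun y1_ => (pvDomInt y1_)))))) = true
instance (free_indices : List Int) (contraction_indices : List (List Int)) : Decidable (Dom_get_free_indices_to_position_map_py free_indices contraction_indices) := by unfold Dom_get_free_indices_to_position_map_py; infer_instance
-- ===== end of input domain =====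

-- B replaces A's shared counter + inner while-scan by a contracted set and a zip with a
-- precomputed filtered range of positions (objective: faster).


-- ===== PORT A =====
-- the 'while counter in flattened_contraction_indices: counter += 1' loop; terminates because
-- each step consumes one occurrence of a flat element ≥ counter
theorem pvSuccLeEqLt (c : Int) : (fun x : Int => decide (c + 1 ≤ x)) = (fun x : Int => decide (c < x)) := by
  funext x; simp only [Int.lt_iff_add_one_le]

theorem pvFiltSucc (flat : List Int) (c : Int) :
    (flat.filter (fun x => decide (c ≤ x))).length
    = (flat.filter (fun x => decide (c < x))).length + flat.count c := by
  induction flat with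
  | nil => simp
  | cons a l ih =>
    simp only [List.filter_cons, List.count_cons, beq_iff_eq]
    by_cases h1 : c ≤ a <;> by_cases h2 : c < a <;> by_cases h3 : a = c <;>
      simp [h1, h2, h3, ih] <;> omega

theorem pvSkip_measure (flat : List Int) (c : Int) (h : c ∈ flat) :
    (flat.filter (fun x => decide (c + 1 ≤ x))).length < (flat.filter (fun x => decide (c ≤ x))).length := by
  rw [pvSuccLeEqLt]
  have h1 := pvFiltSucc flat c
  have h2 : 0 < flat.count c := List.count_pos_iff.mpr h
  omega

def pvSkip (flat : List Int) (c : Int) : Int :=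
  if c ∈ flat then pvSkip flat (c + 1) else c
termination_by (flat.filter (fun x => decide (c ≤ x))).length
decreasing_by exact pvSkip_measure flat c (by assumption)

def get_free_indices_to_position_map_py (free_indices : List Int) (contraction_indices : List (List Int)) : List (Int × Int) :=
  let flattened_contraction_indices := contraction_indices.flatMap id
  let st := free_indices.foldl
    (fun (s : PySem.Dict Int Int × Int) ind =>
      let counter := pvSkip flattened_contraction_indices s.2
      (s.1.insert ind counter, counter + 1))
    (PySem.Dict.empty, 0)
  st.1.items

-- ===== PORT B =====
def get_free_indices_to_position_map_py_alt (free_indices : List Int) (contraction_indices : List (List Int)) : List (Int × Int) :=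
  let contracted : PySem.Set Int := PySem.Set.ofList (contraction_indices.flatMap id)
  let bound := free_indices.length + (contraction_indices.map List.length).sum
  let positions := ((List.range bound).map (fun i => Int.ofNat i)).filter (fun p => !(PySem.Set.contains contracted p))
  let d := (free_indices.zip positions).foldl (fun d (p : Int × Int) => d.insert p.1 p.2) PySem.Dict.empty
  d.items

-- ===== PRECONDITION & SPEC =====
def Spec_get_free_indices_to_position_map_py (free_indices : List Int) (contraction_indices : List (List Int)) (out : List (Int × Int)) : Prop := out = get_free_indices_to_position_map_py_alt free_indices contraction_indices
instance (free_indices : List Int) (contraction_indices : List (List Int)) (out : List (Int × Int)) : Decidable (Spec_get_free_indices_to_position_map_py free_indices contraction_indices out) := by unfold Spec_get_free_indices_to_position_map_py; infer_instance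

-- ===== CLAIM (what is proved, stated in full; the proofs are below) =====
def Claim_equal_get_free_indices_to_position_map_py : Prop := ∀ (free_indices : List Int) (contraction_indices : List (List Int)), Dom_get_free_indices_to_position_map_py free_indices contraction_indices → Spec_get_free_indices_to_position_map_py free_indices contraction_indices (get_free_indices_to_position_map_py free_indices contraction_indices)

-- ===== LEMMAS AND PROOFS =====

-- the sequence of positions A's counter assigns, starting from counter value c
def pvStream (flat : List Int) (c : Int) : Nat → List Int
  | 0 => []
  | n + 1 => pvSkip flat c :: pvStream flat (pvSkip flat c + 1) n

-- consecutive integers starting at c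
def pvInts (c : Int) (N : Nat) : List Int := (List.range N).map (fun i => c + Int.ofNat i)

theorem pvSkip_of_mem (flat : List Int) (c : Int) (h : c ∈ flat) : pvSkip flat c = pvSkip flat (c + 1) := by
  rw [pvSkip]; simp [h]

theorem pvSkip_of_not_mem (flat : List Int) (c : Int) (h : c ∉ flat) : pvSkip flat c = c := by
  rw [pvSkip]; simp [h]

theorem pvInts_succ (c : Int) (N : Nat) : pvInts c (N + 1) = c :: pvInts (c + 1) N := by
  unfold pvInts
  rw [List.range_succ_eq_map]
  rw [List.map_cons, List.map_map]
  congr 1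
  · simp
  apply List.map_congr_left
  intro i _
  simp only [Function.comp_apply, Nat.succ_eq_add_one, Int.ofNat_eq_natCast]
  push_cast
  ring

theorem pvStream_of_mem (flat : List Int) (c : Int) (n : Nat) (h : c ∈ flat) :
    pvStream flat c n = pvStream flat (c + 1) n := by
  cases n with
  | zero => rfl
  | succ m => simp [pvStream, pvSkip_of_mem flat c h]

-- the first n valid positions in a long-enough block of consecutive integers are A's stream
theorem take_filter_pvInts (flat : List Int) : ∀ (N : Nat) (c : Int) (n : Nat),
    n + (flat.filter (fun x => decide (c ≤ x))).length ≤ N →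
    ((pvInts c N).filter (fun p => !decide (p ∈ flat))).take n = pvStream flat c n := by
  intro N
  induction N with
  | zero =>
    intro c n h
    have : n = 0 := by omega
    subst this
    simp [pvStream]
  | succ N ih =>
    intro c n h
    cases n with
    | zero => simp [pvStream]
    | succ m =>
      rw [pvInts_succ]
      have hfs := pvFiltSucc flat c
      by_cases hc : c ∈ flat
      · have hcnt : 0 < flat.count c := List.count_pos_iff.mpr hc
        rw [List.filter_cons_of_neg (by simp [hc])]
        rw [ih (c + 1) (m + 1) (by rw [pvSuccLeEqLt]; omega)]
        exact (pvStream_of_mem flat c (m + 1) hc).symm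
      · rw [List.filter_cons_of_pos (by simp [hc])]
        rw [List.take_succ_cons]
        rw [ih (c + 1) m (by rw [pvSuccLeEqLt]; omega)]
        simp [pvStream, pvSkip_of_not_mem flat c hc]

-- A's for-loop over free_indices, from any dict and counter, inserts the zip with the stream
theorem loopA (flat : List Int) : ∀ (free : List Int) (d : PySem.Dict Int Int) (c : Int),
    (free.foldl
      (fun (s : PySem.Dict Int Int × Int) ind =>
        (s.1.insert ind (pvSkip flat s.2), pvSkip flat s.2 + 1)) (d, c)).1
    = (free.zip (pvStream flat c free.length)).foldl (fun d (p : Int × Int) => d.insert p.1 p.2) d := by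
  intro free
  induction free with
  | nil => intros; simp [pvStream]
  | cons a l ih =>
    intro d c
    simp only [List.foldl_cons, List.length_cons, pvStream, List.zip_cons_cons]
    exact ih (d.insert a (pvSkip flat c)) (pvSkip flat c + 1)

-- zip truncates its second argument
theorem zip_take_right {α β : Type} : ∀ (xs : List α) (ys : List β), xs.zip (ys.take xs.length) = xs.zip ys := by
  intro xs
  induction xs with
  | nil => intro ys; simp
  | cons a l ih =>
    intro ys
    cases ys with
    | nil => simp
    | cons b t => simp [List.zip_cons_cons, ih t]

-- ===== VERDICT (by name: the statement is the Claim_ definition above) =====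
theorem get_free_indices_to_position_map_py_spec : Claim_equal_get_free_indices_to_position_map_py := by
  intro free contr _
  unfold Spec_get_free_indices_to_position_map_py
  unfold get_free_indices_to_position_map_py get_free_indices_to_position_map_py_alt
  simp only []
  set flat := contr.flatMap id with hflat
  have hpred : (fun p => !(PySem.Set.contains (PySem.Set.ofList flat) p)) = (fun p : Int => !decide (p ∈ flat)) := by
    funext p
    by_cases h : p ∈ flat <;>
      simp [PySem.Set.contains_eq_listContains, PySem.Set.mem_ofList, h]
  have hints : (List.range (free.length + (contr.map List.length).sum)).map (fun i => Int.ofNat i)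
      = pvInts 0 (free.length + (contr.map List.length).sum) := by
    unfold pvInts
    apply List.map_congr_left
    intro i _
    simp [Int.ofNat_eq_natCast]
  have hflatlen : flat.length = (contr.map List.length).sum := by
    simp [hflat]
  have hbound : free.length + (flat.filter (fun x => decide ((0:Int) ≤ x))).length
      ≤ free.length + (contr.map List.length).sum := by
    have := List.length_filter_le (fun x => decide ((0:Int) ≤ x)) flat
    omega
  rw [loopA flat free PySem.Dict.empty 0]
  congr 1
  rw [hpred, hints]
  rw [← zip_take_right free (((pvInts 0 (free.length + (contr.map List.length).sum)).filter (fun p => !decide (p ∈ flat))))]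
  rw [take_filter_pvInts flat _ 0 free.length hbound]
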